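-- pv_equiv track=rewrite | github.com/xiaohuanlin/Algorithms | Leetcode/2592. Maximize Greatness of an Array.py | maximizeGreatness
-- ===== SOURCE A (Python) =====
-- from typing import List
--
-- def maximizeGreatness(nums: List[int]) -> int:
--     slow = 0
--     fast = 0
--     nums.sort()
--     while fast < len(nums):
--         while fast < len(nums) and nums[fast] <= nums[slow]:
--             fast += 1
--         if fast >= len(nums):
--             break
--         slow += 1
--         fast += 1
--     return slow
-- ===== SOURCE B (Python) =====
-- from typing import List
--
-- def maximizeGreatness(nums: List[int]) -> int:
--     freq = {}
--     best = 0
--     for v in nums: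
--         c = freq.get(v, 0) + 1
--         freq[v] = c
--         if c > best:
--             best = c
--     return len(nums) - best
-- ===== Notes on version B (the rewrite author's own statement) =====
-- stated objective: faster
-- what changed: Replaces A's sort plus two-pointer sweep by a single hash-map counting pass using the identity answer = n - (max frequency of any element); note A sorts its argument in place while B leaves it untouched (return values agree).
import Mathlib
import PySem

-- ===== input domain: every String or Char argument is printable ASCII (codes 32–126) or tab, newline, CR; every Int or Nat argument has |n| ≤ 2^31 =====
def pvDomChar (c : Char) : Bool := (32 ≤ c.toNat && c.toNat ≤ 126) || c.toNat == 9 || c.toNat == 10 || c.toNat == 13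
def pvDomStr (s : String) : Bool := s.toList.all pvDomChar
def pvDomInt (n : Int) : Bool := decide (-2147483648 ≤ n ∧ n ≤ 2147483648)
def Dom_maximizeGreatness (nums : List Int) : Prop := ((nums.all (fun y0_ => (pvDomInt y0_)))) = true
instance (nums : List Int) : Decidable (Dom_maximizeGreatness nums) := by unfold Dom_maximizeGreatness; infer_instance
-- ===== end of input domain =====

-- B replaces A's sort + two-pointer sweep by one counting pass (answer = n - max frequency);
-- A sorts its argument in place, B does not: the equivalence proved here is about the return value only.

-- ===== PORT A =====
-- inner loop 'while fast < len(nums) and nums[fast] <= nums[slow]: fast += 1'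
-- (both indices are in range whenever Python reads them, so List.getD is exact here)
def pvInnerA (s : List Int) (slow fast : Nat) : Nat :=
  if h : fast < s.length ∧ s.getD fast 0 ≤ s.getD slow 0 then pvInnerA s slow (fast + 1) else fast
termination_by s.length - fast
decreasing_by omega

theorem pvInnerA_ge (s : List Int) (slow fast : Nat) : fast ≤ pvInnerA s slow fast := by
  fun_induction pvInnerA s slow fast with
  | case1 _ _ ih => omega
  | case2 => omega

-- outer loop 'while fast < len(nums): <inner>; if fast >= len(nums): break; slow += 1; fast += 1'
def pvOuterA (s : List Int) (slow fast : Nat) : Nat :=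
  if h : fast < s.length then
    let f := pvInnerA s slow fast
    if f ≥ s.length then slow else pvOuterA s (slow + 1) (f + 1)
  else slow
termination_by s.length - fast
decreasing_by
  have := pvInnerA_ge s slow fast
  omega

def maximizeGreatness (nums : List Int) : Int :=
  ((pvOuterA (PySem.List.sorted nums (fun x => x) false) 0 0 : Nat) : Int)

-- ===== PORT B =====
-- 'freq = {}; best = 0; for v in nums: c = freq.get(v,0)+1; freq[v] = c; if c > best: best = c; return len(nums) - best'
def maximizeGreatness_alt (nums : List Int) : Int :=
  let st := nums.foldl
    (fun (p : PySem.Dict Int Int × Int) v =>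
      let c := p.1.getD v 0 + 1
      (p.1.insert v c, if c > p.2 then c else p.2))
    (PySem.Dict.empty, 0)
  (nums.length : Int) - st.2

-- ===== PRECONDITION & SPEC =====
def Spec_maximizeGreatness (nums : List Int) (out : Int) : Prop := out = maximizeGreatness_alt nums
instance (nums : List Int) (out : Int) : Decidable (Spec_maximizeGreatness nums out) := by unfold Spec_maximizeGreatness; infer_instance

-- ===== CLAIM (what is proved, stated in full; the proofs are below) =====
def Claim_equal_maximizeGreatness : Prop := ∀ (nums : List Int), Dom_maximizeGreatness nums → Spec_maximizeGreatness nums (maximizeGreatness nums)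

-- ===== LEMMAS AND PROOFS =====

-- the maximal multiplicity of any element of l, as an Int (0 for the empty list)
def pvMaxCnt (l : List Int) : Int := l.foldl (fun acc v => max acc ((l.count v : Nat) : Int)) 0

theorem pvFoldlMaxLe (l : List Int) (f : Int → Int) (init c : Int)
    (h0 : init ≤ c) (h : ∀ x ∈ l, f x ≤ c) :
    l.foldl (fun a x => max a (f x)) init ≤ c := by
  induction l generalizing init with
  | nil => simpa using h0
  | cons y t ih =>
    simp only [List.foldl_cons]
    exact ih _ (max_le h0 (h y (by simp))) (fun x hx => h x (by simp [hx]))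

theorem pvMaxCnt_nonneg (l : List Int) : 0 ≤ pvMaxCnt l :=
  (PySem.List.le_foldl_max_int l (fun v => ((l.count v : Nat) : Int)) 0).1

theorem pvCount_le_maxCnt (l : List Int) {v : Int} (hv : v ∈ l) : ((l.count v : Nat) : Int) ≤ pvMaxCnt l :=
  (PySem.List.le_foldl_max_int l (fun v => ((l.count v : Nat) : Int)) 0).2 v hv

theorem pvMaxCnt_le (l : List Int) (c : Int) (h0 : 0 ≤ c)
    (h : ∀ v ∈ l, ((l.count v : Nat) : Int) ≤ c) : pvMaxCnt l ≤ c :=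
  pvFoldlMaxLe l _ 0 c h0 h

theorem pvMaxCnt_perm {l l' : List Int} (h : l.Perm l') : pvMaxCnt l = pvMaxCnt l' := by
  apply le_antisymm
  · exact pvMaxCnt_le l _ (pvMaxCnt_nonneg l')
      (fun v hv => by rw [h.count_eq]; exact pvCount_le_maxCnt l' (h.mem_iff.mp hv))
  · exact pvMaxCnt_le l' _ (pvMaxCnt_nonneg l)
      (fun v hv => by rw [← h.count_eq]; exact pvCount_le_maxCnt l (h.mem_iff.mpr hv))

theorem pvMaxCnt_append_singleton (p : List Int) (x : Int) :
    pvMaxCnt (p ++ [x]) = max (pvMaxCnt p) (((p.count x : Nat) : Int) + 1) := by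
  apply le_antisymm
  · apply pvMaxCnt_le
    · exact le_max_of_le_right (by positivity)
    · intro v hv
      by_cases hvx : v = x
      · subst hvx
        apply le_max_of_le_right
        simp [List.count_append]
      · have hvp : v ∈ p := by
          rcases List.mem_append.mp hv with h | h
          · exact h
          · simp at h; exact absurd h hvx
        apply le_max_of_le_left
        have h0 : [x].count v = 0 := List.count_eq_zero.mpr (by simp [hvx])
        have hcnt : (p ++ [x]).count v = p.count v := by
          rw [List.count_append, h0]
          omega
        rw [hcnt]
        exact pvCount_le_maxCnt p hvp
  · apply max_le
    · apply pvMaxCnt_le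
      · exact pvMaxCnt_nonneg _
      · intro v hv
        have h1 : p.count v ≤ (p ++ [x]).count v := by simp [List.count_append]
        calc ((p.count v : Nat) : Int) ≤ (((p ++ [x]).count v : Nat) : Int) := by exact_mod_cast h1
          _ ≤ pvMaxCnt (p ++ [x]) := pvCount_le_maxCnt _ (List.mem_append.mpr (Or.inl hv))
    · have hx : x ∈ p ++ [x] := List.mem_append.mpr (Or.inr (by simp))
      have h2 := pvCount_le_maxCnt (p ++ [x]) hx
      have hc : (p ++ [x]).count x = p.count x + 1 := by simp [List.count_append]
      rw [hc] at h2
      push_cast at h2 ⊢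
      omega

-- ===== B-side characterisation =====

theorem pvBfold (l : List Int) :
    l.foldl
      (fun (p : PySem.Dict Int Int × Int) v =>
        let c := p.1.getD v 0 + 1
        (p.1.insert v c, if c > p.2 then c else p.2))
      (PySem.Dict.empty, 0)
    = (l.foldl (fun d v => d.insert v (d.getD v 0 + 1)) PySem.Dict.empty, pvMaxCnt l) := by
  induction l using List.reverseRecOn with
  | nil => rfl
  | append_singleton t x ih =>
    rw [List.foldl_append, List.foldl_append, ih]
    simp only [List.foldl_cons, List.foldl_nil]
    have hget : ((t.foldl (fun d v => d.insert v (d.getD v 0 + 1)) PySem.Dict.empty).getD x 0)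
        = ((t.count x : Nat) : Int) := by
      have h := PySem.Dict.getD_foldl_insert_add_one (l := t) (d := PySem.Dict.empty) (v := x)
      simpa using h
    have hmax := pvMaxCnt_append_singleton t x
    refine Prod.ext rfl ?_
    simp only [hget, hmax]
    have hle := pvMaxCnt_nonneg t
    split_ifs with h <;> omega

theorem pvAltEq (nums : List Int) :
    maximizeGreatness_alt nums = (nums.length : Int) - pvMaxCnt nums := by
  unfold maximizeGreatness_alt
  rw [pvBfold]

-- ===== A-side: loop invariant (on the sorted list, fast - slow = max multiplicity of the prefix) =====

-- all of s[slow..fast) equal to x forces count x (s.take fast) ≥ fast - slow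
theorem pvCount_take_ge (s : List Int) (slow fast : Nat) (x : Int)
    (hfn : fast ≤ s.length)
    (h : ∀ j, slow ≤ j → j < fast → ∀ hj : j < s.length, s[j] = x) :
    fast - slow ≤ (s.take fast).count x := by
  have hdrop : ((s.take fast).drop slow).count x = ((s.take fast).drop slow).length := by
    rw [List.count_eq_length]
    intro b hb
    obtain ⟨i, hi, rfl⟩ := List.getElem_of_mem hb
    rw [List.getElem_drop, List.getElem_take]
    exact (h (slow + i) (by omega) (by simp [List.length_take] at hi; omega)
      (by simp [List.length_take] at hi; omega)).symm
  have hsplit : (s.take fast) = (s.take fast).take slow ++ (s.take fast).drop slow :=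
    (List.take_append_drop _ _).symm
  have hlen : ((s.take fast).drop slow).length = fast - slow := by
    simp [List.length_take, List.length_drop]
    omega
  have hcnt : (s.take fast).count x = ((s.take fast).take slow).count x + ((s.take fast).drop slow).count x := by
    rw [← List.count_append, ← hsplit]
  omega

-- if every entry of s before k is < x then x does not occur in s.take k
theorem pvCount_take_zero (s : List Int) (k : Nat) (x : Int)
    (h : ∀ j, j < k → ∀ hj : j < s.length, s[j] < x) :
    (s.take k).count x = 0 := by
  rw [List.count_eq_zero]
  intro hmem
  obtain ⟨i, hi, hx⟩ := List.getElem_of_mem hmem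
  rw [List.getElem_take] at hx
  have hik : i < k := by simp [List.length_take] at hi; omega
  have his : i < s.length := by simp [List.length_take] at hi; omega
  exact absurd hx (ne_of_lt (h i hik his))

-- count never exceeds the prefix count plus the length of the rest
theorem pvCount_split (l : List Int) (m : Nat) (x : Int) :
    l.count x ≤ (l.take m).count x + (l.length - m) := by
  conv_lhs => rw [← List.take_append_drop m l]
  rw [List.count_append]
  have h1 : (l.drop m).count x ≤ (l.drop m).length := List.count_le_length
  simp [List.length_drop] at h1 ⊢
  omega

theorem pvInnerA_spec (s : List Int) (slow fast : Nat)
    (hs : s.Pairwise (· ≤ ·)) :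
    slow ≤ fast → fast ≤ s.length → pvMaxCnt (s.take fast) = (fast : Int) - (slow : Int) →
    fast ≤ pvInnerA s slow fast ∧ pvInnerA s slow fast ≤ s.length ∧
    pvMaxCnt (s.take (pvInnerA s slow fast)) = (pvInnerA s slow fast : Int) - (slow : Int) ∧
    (pvInnerA s slow fast < s.length →
      ¬ (s.getD (pvInnerA s slow fast) 0 ≤ s.getD slow 0)) := by
  have hmono := List.pairwise_iff_getElem.mp hs
  fun_induction pvInnerA s slow fast with
  | case1 fast h ih =>
    intro hsf hfn hinv
    obtain ⟨hflt, hle⟩ := h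
    have hslt : slow < s.length := lt_of_le_of_lt hsf hflt
    rw [List.getD_eq_getElem s 0 hflt, List.getD_eq_getElem s 0 hslt] at hle
    have heq : s[fast] = s[slow] := by
      rcases Nat.eq_or_lt_of_le hsf with h' | h'
      · subst h'; rfl
      · exact le_antisymm hle (hmono slow fast hslt hflt h')
    -- every index in [slow, fast] carries the value s[fast]
    have hall : ∀ j, slow ≤ j → j < fast + 1 → ∀ hj : j < s.length, s[j] = s[fast] := by
      intro j h1 h2 hj
      have hlo : s[slow] ≤ s[j] := by
        rcases Nat.eq_or_lt_of_le h1 with h' | h'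
        · subst h'; exact le_refl _
        · exact hmono slow j hslt hj h'
      have hhi : s[j] ≤ s[fast] := by
        rcases Nat.lt_or_ge j fast with h' | h'
        · exact hmono j fast hj hflt h'
        · have : j = fast := by omega
          subst this; exact le_refl _
      rw [heq]
      exact le_antisymm (heq ▸ hhi) hlo
    -- count of s[fast] in the prefix is exactly fast - slow
    have hlow : fast - slow ≤ (s.take fast).count s[fast] :=
      pvCount_take_ge s slow fast s[fast] (le_of_lt hflt)
        (fun j h1 h2 hj => hall j h1 (by omega) hj)
    have hup : ((s.take fast).count s[fast] : Int) ≤ (fast : Int) - (slow : Int) := by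
      by_cases hmem : s[fast] ∈ s.take fast
      · rw [← hinv]; exact pvCount_le_maxCnt _ hmem
      · rw [List.count_eq_zero.mpr hmem]; push_cast; omega
    have hcnt : ((s.take fast).count s[fast] : Int) = (fast : Int) - (slow : Int) := by
      have := hlow
      omega
    -- the new invariant after consuming s[fast]
    have hstep : pvMaxCnt (s.take (fast + 1)) = ((fast + 1 : Nat) : Int) - (slow : Int) := by
      rw [List.take_succ_eq_append_getElem hflt, pvMaxCnt_append_singleton, hinv, hcnt]
      push_cast
      omega
    have hres := ih (by omega) hflt hstep
    exact ⟨le_trans (by omega) hres.1, hres.2.1, hres.2.2.1, hres.2.2.2⟩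
  | case2 fast h =>
    intro hsf hfn hinv
    refine ⟨le_refl _, hfn, hinv, fun hlt hle => ?_⟩
    exact h ⟨hlt, hle⟩

theorem pvOuterA_spec (s : List Int) (slow fast : Nat)
    (hs : s.Pairwise (· ≤ ·)) :
    slow ≤ fast → fast ≤ s.length → pvMaxCnt (s.take fast) = (fast : Int) - (slow : Int) →
    ((pvOuterA s slow fast : Nat) : Int) = (s.length : Int) - pvMaxCnt s := by
  have hmono := List.pairwise_iff_getElem.mp hs
  fun_induction pvOuterA s slow fast with
  | case1 slow fast hlt f hbreak =>
    -- inner loop ran off the end: f = length, invariant gives pvMaxCnt s = length - slow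
    intro hsf hfn hinv
    have hspec := pvInnerA_spec s slow fast hs hsf hfn hinv
    have hfl : f = s.length := by
      have := hspec.2.1
      omega
    have : pvMaxCnt s = (s.length : Int) - (slow : Int) := by
      have h := hspec.2.2.1
      rw [show pvInnerA s slow fast = f from rfl, hfl, List.take_length] at h
      exact h
    omega
  | case2 slow fast hlt f hcont ih =>
    intro hsf hfn hinv
    have hspec := pvInnerA_spec s slow fast hs hsf hfn hinv
    have hff : f < s.length := by omega
    have hfge : fast ≤ f := hspec.1
    have hinvf : pvMaxCnt (s.take f) = (f : Int) - (slow : Int) := hspec.2.2.1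
    have hslt : slow < s.length := lt_of_le_of_lt hsf hlt
    have hgtD : ¬ s.getD (pvInnerA s slow fast) 0 ≤ s.getD slow 0 := hspec.2.2.2 hff
    have hsltf : slow < f := by
      rcases Nat.lt_or_ge slow f with h' | h'
      · exact h'
      · exfalso
        apply hgtD
        rcases Nat.eq_or_lt_of_le h' with he | hl
        · exact le_of_eq (by rw [show pvInnerA s slow fast = slow from he])
        · rw [List.getD_eq_getElem s 0 hff, List.getD_eq_getElem s 0 hslt]
          exact hmono f slow hff hslt hl
    have hgt : s[slow] < s[f] := by
      rw [List.getD_eq_getElem s 0 hff, List.getD_eq_getElem s 0 hslt] at hgtD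
      omega
    -- occurrences of s[f] in s.take f all lie strictly between slow and f
    have hzero : ((s.take f).take (slow + 1)).count s[f] = 0 := by
      rw [List.take_take, min_eq_left (by omega)]
      apply pvCount_take_zero
      intro j hj hjs
      have : s[j] ≤ s[slow] := by
        rcases Nat.lt_or_ge j slow with h' | h'
        · exact hmono j slow hjs hslt h'
        · have : j = slow := by omega
          subst this; exact le_refl _
      omega
    have hcnt : (s.take f).count s[f] ≤ f - slow - 1 := by
      have h1 := pvCount_split (s.take f) (slow + 1) s[f]
      rw [hzero] at h1
      have h2 : (s.take f).length = f := by simp [List.length_take]; omega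
      rw [h2] at h1
      omega
    have hstep : pvMaxCnt (s.take (f + 1)) = ((f + 1 : Nat) : Int) - ((slow + 1 : Nat) : Int) := by
      rw [List.take_succ_eq_append_getElem hff, pvMaxCnt_append_singleton, hinvf]
      have : ((s.take f).count s[f] : Int) ≤ (f : Int) - (slow : Int) - 1 := by
        have := hcnt
        omega
      push_cast
      omega
    exact ih (by omega) (by omega) hstep
  | case3 slow fast hge =>
    intro hsf hfn hinv
    have hfl : fast = s.length := by omega
    rw [hfl, List.take_length] at hinv
    omega

-- ===== VERDICT (by name: the statement is the Claim_ definition above) =====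
theorem maximizeGreatness_spec : Claim_equal_maximizeGreatness := by
  intro nums _
  unfold Spec_maximizeGreatness
  rw [pvAltEq]
  unfold maximizeGreatness
  have hperm := PySem.List.sorted_perm (xs := nums) (key := fun x => x) (rev := false)
  have hlen : (PySem.List.sorted nums (fun x => x) false).length = nums.length := hperm.length_eq
  have hpw : (PySem.List.sorted nums (fun x => x) false).Pairwise (· ≤ ·) :=
    PySem.List.sorted_pairwise nums (fun x => x)
  have h0 : pvMaxCnt ((PySem.List.sorted nums (fun x => x) false).take 0) = ((0 : Nat) : Int) - ((0 : Nat) : Int) := by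
    simp [pvMaxCnt]
  have h := pvOuterA_spec (PySem.List.sorted nums (fun x => x) false) 0 0 hpw (le_refl _) (Nat.zero_le _) h0
  rw [h, hlen, pvMaxCnt_perm hperm]
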